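-- pv_equiv track=rewrite | github.com/crazysprinter123/entitlement-ci | testcases/virt_who/virtwhobase.py | __parse_listavailable_output
-- ===== SOURCE A (Python) =====
-- def __parse_listavailable_output(output):
--     datalines = output.splitlines()
--     data_list = []
--     # split output into segmentations for each pool
--     data_segs = []
--     segs = []
--     tmpline = ""
--     for line in datalines:
--         if ("Product Name:" in line) or ("ProductName" in line) or ("Subscription Name" in line):
--             tmpline = line
--         elif line and ":" not in line:
--             tmpline = tmpline + ' ' + line.strip()
--         elif line and ":" in line:
--             segs.append(tmpline)
--             tmpline = line
--         if ("Machine Type:" in line) or ("MachineType:" in line) or ("System Type:" in line) or ("SystemType:" in line):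
--             segs.append(tmpline)
--             data_segs.append(segs)
--             segs = []
--     for seg in data_segs:
--         data_dict = {}
--         for item in seg:
--             keyitem = item.split(":")[0].replace(' ', '')
--             valueitem = item.split(":")[1].strip()
--             data_dict[keyitem] = valueitem
--         data_list.append(data_dict)
--     return data_list
-- ===== SOURCE B (Python) =====
-- def _flush(data_dict, tmpline):
--     # finalize the buffered line: split once on ':' into key (spaces removed) and value;
--     # a buffer without a colon is malformed and skipped (A crashes or discards such buffers)
--     if ":" in tmpline:
--         parts = tmpline.split(":")
--         data_dict[parts[0].replace(" ", "")] = parts[1].strip()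
--
--
-- def __parse_listavailable_output(output):
--     data_list = []
--     current = {}
--     tmpline = ""
--     for line in output.splitlines():
--         if "Product Name:" in line or "ProductName" in line or "Subscription Name" in line:
--             tmpline = line
--         elif line and ":" not in line:
--             tmpline += " " + line.strip()
--         elif line:
--             _flush(current, tmpline)
--             tmpline = line
--         if ("Machine Type:" in line or "MachineType:" in line
--                 or "System Type:" in line or "SystemType:" in line):
--             _flush(current, tmpline)
--             data_list.append(current)
--             current = {}
--     return data_list
-- ===== Notes on version B (the rewrite author's own statement) =====
-- stated objective: simpler
-- what changed: B fuses A's two phases into one pass: instead of first collecting raw line-buffers into segs/data_segs and then mapping a second split-and-dict loop over them, B finalizes each buffered line immediately into the current dict (splitting it once on the colon separator), appending the dict at each Machine/System Type line; buffers without a colon are skipped, which is exactly where A raises IndexError or discards them.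
import Mathlib
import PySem

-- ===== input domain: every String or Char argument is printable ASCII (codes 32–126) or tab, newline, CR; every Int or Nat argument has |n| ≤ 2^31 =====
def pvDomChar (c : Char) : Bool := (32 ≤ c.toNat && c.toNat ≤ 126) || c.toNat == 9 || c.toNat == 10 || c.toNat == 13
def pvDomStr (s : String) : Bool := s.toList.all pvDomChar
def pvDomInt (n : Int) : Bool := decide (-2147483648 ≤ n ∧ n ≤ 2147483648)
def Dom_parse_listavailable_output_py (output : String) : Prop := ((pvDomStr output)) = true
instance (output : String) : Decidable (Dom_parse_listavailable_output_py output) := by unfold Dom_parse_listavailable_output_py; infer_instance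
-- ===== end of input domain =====

-- B fuses A's two passes (collect raw segment lines, then split each into a dict) into one
-- pass that finalizes each buffered line into the current dict immediately; buffers without
-- a colon are skipped, exactly where A raises IndexError or discards them (objective: simpler).

-- ===== PORT A =====
-- shared transliterations of the source's repeated membership tests
def pvIsProd (line : String) : Bool :=
  PySem.Str.isIn "Product Name:" line || PySem.Str.isIn "ProductName" line ||
  PySem.Str.isIn "Subscription Name" line

def pvIsMach (line : String) : Bool :=
  PySem.Str.isIn "Machine Type:" line || PySem.Str.isIn "MachineType:" line ||
  PySem.Str.isIn "System Type:" line || PySem.Str.isIn "SystemType:" line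

-- the colon membership test on a line
def pvColon (line : String) : Bool := PySem.Str.isIn ":" line

-- A's second loop splits item on the colon, takes piece 0 with spaces removed as the key and
-- the stripped piece 1 as the value (piece 0 always exists since split is never empty; piece 1
-- is IndexError when no colon is present —
-- those inputs are excluded by Pre_, the port defaults to "")
def pvKey (item : String) : String :=
  PySem.Str.replace ((PySem.List.pyGet? ((PySem.Str.split? item ":").getD []) 0).getD "") " " ""

def pvVal (item : String) : String :=
  PySem.Str.strip ((PySem.List.pyGet? ((PySem.Str.split? item ":").getD []) 1).getD "")

-- first loop of A: state (tmpline, segs, data_segs)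
def pvStepA (st : String × List String × List (List String)) (line : String) :
    String × List String × List (List String) :=
  let tmpline := st.1
  let segs := st.2.1
  let data_segs := st.2.2
  let ts : String × List String :=
    if pvIsProd line then (line, segs)
    else if line != "" && !pvColon line then (tmpline ++ " " ++ PySem.Str.strip line, segs)
    else if line != "" && pvColon line then (line, segs ++ [tmpline])
    else (tmpline, segs)
  if pvIsMach line then (ts.1, [], data_segs ++ [ts.2 ++ [ts.1]])
  else (ts.1, ts.2, data_segs)

-- second loop of A: build data_dict from one seg
def pvInsA (d : PySem.Dict String String) (item : String) : PySem.Dict String String :=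
  d.insert (pvKey item) (pvVal item)

def pvPool (seg : List String) : List (String × String) :=
  (seg.foldl pvInsA PySem.Dict.empty).items

def parse_listavailable_output_py (output : String) : List (List (String × String)) :=
  let st := (PySem.Str.splitlines output).foldl pvStepA ("", [], [])
  st.2.2.map pvPool

-- ===== PORT B =====
-- _flush(data_dict, tmpline)
def pvFlush (d : PySem.Dict String String) (tmpline : String) : PySem.Dict String String :=
  if pvColon tmpline then d.insert (pvKey tmpline) (pvVal tmpline) else d

-- single fused loop of B: state (tmpline, current, data_list)
def pvStepB (st : String × PySem.Dict String String × List (List (String × String)))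
    (line : String) : String × PySem.Dict String String × List (List (String × String)) :=
  let tmpline := st.1
  let current := st.2.1
  let data_list := st.2.2
  let tc : String × PySem.Dict String String :=
    if pvIsProd line then (line, current)
    else if line != "" && !pvColon line then (tmpline ++ " " ++ PySem.Str.strip line, current)
    else if line != "" then (line, pvFlush current tmpline)
    else (tmpline, current)
  if pvIsMach line then (tc.1, PySem.Dict.empty, data_list ++ [(pvFlush tc.2 tc.1).items])
  else (tc.1, tc.2, data_list)

def parse_listavailable_output_py_alt (output : String) : List (List (String × String)) :=
  ((PySem.Str.splitlines output).foldl pvStepB ("", PySem.Dict.empty, [])).2.2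

-- ===== PRECONDITION & SPEC =====
-- colon-status of the buffer after folding a prefix of lines (a colon-containing line makes the
-- buffer contain colon, a product-name line without colon resets it, other lines preserve it)
def pvBufStep (b : Bool) (l : String) : Bool :=
  if pvColon l then true else if pvIsProd l then false else b

def pvBuf (ls : List String) : Bool := ls.foldl pvBufStep false

-- Pre_ excludes exactly the inputs on which A raises IndexError: a buffered line without a colon
-- that gets committed (by a later colon-line while a Machine/System Type line still follows, or
-- by a Machine/System Type line itself) reaches the missing piece 1 of the split in A's second loop.
def Pre_parse_listavailable_output_py (output : String) : Prop :=
  ∀ i < (PySem.Str.splitlines output).length,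
    ((pvIsProd ((PySem.Str.splitlines output).getD i "") = false ∧
      (PySem.Str.splitlines output).getD i "" ≠ "" ∧
      pvColon ((PySem.Str.splitlines output).getD i "") = true ∧
      ((PySem.Str.splitlines output).drop i).any pvIsMach = true) →
        pvBuf ((PySem.Str.splitlines output).take i) = true) ∧
    (pvIsMach ((PySem.Str.splitlines output).getD i "") = true →
        pvBuf ((PySem.Str.splitlines output).take (i + 1)) = true)

instance (output : String) : Decidable (Pre_parse_listavailable_output_py output) := by
  unfold Pre_parse_listavailable_output_py; infer_instance

def pvWitness_parse_listavailable_output_py : String :=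
  "Subscription Name: SKU1\nMachine Type: virtual"

def Spec_parse_listavailable_output_py (output : String) (out : List (List (String × String))) : Prop := out = parse_listavailable_output_py_alt output
instance (output : String) (out : List (List (String × String))) : Decidable (Spec_parse_listavailable_output_py output out) := by unfold Spec_parse_listavailable_output_py; infer_instance

-- ===== CLAIM (what is proved, stated in full; the proofs are below) =====
def Claim_equal_parse_listavailable_output_py : Prop := ∀ (output : String), Dom_parse_listavailable_output_py output → Pre_parse_listavailable_output_py output → Spec_parse_listavailable_output_py output (parse_listavailable_output_py output)

-- ===== LEMMAS AND PROOFS =====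

-- colon is in a string iff it is one of its characters
lemma pv_colon_iff (s : String) : pvColon s = true ↔ ':' ∈ s.toList := by
  rw [pvColon, PySem.Str.isIn_iff_infix]
  exact List.singleton_infix_iff ':' s.toList

lemma pv_mem_strip {c : Char} {s : List Char} (h : c ∈ PySem.Chars.strip s) : c ∈ s := by
  unfold PySem.Chars.strip PySem.Chars.lstrip PySem.Chars.rstrip at h
  have h1 := (List.dropWhile_sublist (l := (List.dropWhile PySem.Chars.isspace s).reverse)
    (p := PySem.Chars.isspace)).mem (List.mem_reverse.mp h)
  exact (List.dropWhile_sublist _).mem (List.mem_reverse.mp h1)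

-- colon-status of the buffer after a continuation line is unchanged
lemma pv_colon_cont (tmp l : String) (h : pvColon l = false) :
    pvColon (tmp ++ " " ++ PySem.Str.strip l) = pvColon tmp := by
  rw [Bool.eq_iff_iff, pv_colon_iff, pv_colon_iff, String.toList_append, String.toList_append,
    List.mem_append, List.mem_append]
  have hs : ':' ∉ (PySem.Str.strip l).toList := by
    rw [PySem.Str.toList_strip]
    intro hc
    rw [Bool.eq_false_iff] at h
    exact h ((pv_colon_iff l).mpr (pv_mem_strip hc))
  have hsp : ':' ∉ (" " : String).toList := by decide
  constructor
  · rintro ((h1 | h2) | h3)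
    · exact h1
    · exact absurd h2 hsp
    · exact absurd h3 hs
  · exact fun h1 => Or.inl (Or.inl h1)

-- a flush of a colon-containing buffer is A's unconditional insert
lemma pv_flush_eq (d : PySem.Dict String String) (tmp : String)
    (h : pvColon tmp = true) : pvFlush d tmp = pvInsA d tmp := by
  unfold pvFlush pvInsA
  rw [h]
  rfl

-- over a segment whose lines all contain colon, B's guarded flushes build A's dict
lemma pv_fold_flush_eq (seg : List String) (d : PySem.Dict String String)
    (h : seg.all (fun s => pvColon s) = true) :
    seg.foldl pvFlush d = seg.foldl pvInsA d := by
  induction seg generalizing d with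
  | nil => rfl
  | cons x xs ih =>
    simp only [List.all_cons, Bool.and_eq_true] at h
    simp only [List.foldl_cons, pv_flush_eq d x h.1, ih _ h.2]

-- committing the buffer: B's flushed dict is A's dict of the committed segment
lemma pv_commit (segs : List String) (tmp : String)
    (hall : segs.all (fun s => pvColon s) = true)
    (htmp : pvColon tmp = true) :
    (pvFlush (segs.foldl pvFlush PySem.Dict.empty) tmp).items = pvPool (segs ++ [tmp]) := by
  rw [pv_fold_flush_eq segs _ hall, pv_flush_eq _ _ htmp, pvPool]
  rw [List.foldl_append]
  rfl

-- pvBufStep facts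
lemma pv_bufStep_prod (b : Bool) (l : String) (hP : pvIsProd l = true) :
    pvBufStep b l = pvColon l := by
  unfold pvBufStep
  rcases h : pvColon l with _ | _
  · simp [hP]
  · simp

lemma pv_bufStep_colon (b : Bool) (l : String) (hC : pvColon l = true) :
    pvBufStep b l = true := by
  unfold pvBufStep
  rw [hC]
  rfl

lemma pv_bufStep_other (b : Bool) (l : String) (hC : pvColon l = false)
    (hP : pvIsProd l = false) : pvBufStep b l = b := by
  unfold pvBufStep
  rw [hC, hP]
  rfl

-- Pre_, restated as a recursion over the remaining lines with the buffer's colon-status b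
def pvPreS (b : Bool) : List String → Prop
  | [] => True
  | l :: r =>
      ((pvIsProd l = false ∧ l ≠ "" ∧ pvColon l = true ∧
          (pvIsMach l || r.any pvIsMach) = true) → b = true) ∧
      (pvIsMach l = true → pvBufStep b l = true) ∧
      pvPreS (pvBufStep b l) r

lemma pv_pre_to_preS (ls : List String) (b : Bool)
    (h : ∀ i < ls.length,
      ((pvIsProd (ls.getD i "") = false ∧ ls.getD i "" ≠ "" ∧
        pvColon (ls.getD i "") = true ∧ (ls.drop i).any pvIsMach = true) →
          (ls.take i).foldl pvBufStep b = true) ∧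
      (pvIsMach (ls.getD i "") = true → (ls.take (i + 1)).foldl pvBufStep b = true)) :
    pvPreS b ls := by
  induction ls generalizing b with
  | nil => trivial
  | cons l r ih =>
    have h0 := h 0 (by simp)
    simp only [List.getD_cons_zero, List.drop_zero, List.take_zero, List.foldl_nil,
      List.take_succ_cons, List.foldl_cons, List.any_cons] at h0
    refine ⟨h0.1, h0.2, ?_⟩
    apply ih
    intro i hi
    have hs := h (i + 1) (by simpa using Nat.succ_lt_succ hi)
    simpa only [List.getD_cons_succ, List.drop_succ_cons, List.take_succ_cons,
      List.foldl_cons] using hs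

-- the main invariant: running B's fused loop from a state mirroring A's state produces
-- the mapped pools of A's data_segs
lemma pv_loop (rest : List String) :
    ∀ (tmp : String) (segs : List String) (dsegs : List (List String))
      (cur : PySem.Dict String String) (out : List (List (String × String))),
      pvPreS (pvColon tmp) rest →
      (rest.any pvIsMach = true → segs.all (fun s => pvColon s) = true) →
      cur = segs.foldl pvFlush PySem.Dict.empty →
      out = dsegs.map pvPool →
      ((rest.foldl pvStepB (tmp, cur, out)).2.2) =
        ((rest.foldl pvStepA (tmp, segs, dsegs)).2.2).map pvPool := by
  induction rest with
  | nil => intro tmp segs dsegs cur out _ _ _ hout; simpa using hout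
  | cons l r ih =>
    intro tmp segs dsegs cur out hpre hall hcur hout
    obtain ⟨hc1, hc2, hps⟩ := hpre
    simp only [List.foldl_cons]
    by_cases hP : pvIsProd l = true
    · -- product/subscription-name line: buffer := line
      have eA : pvStepA (tmp, segs, dsegs) l =
          (if pvIsMach l then (l, [], dsegs ++ [segs ++ [l]]) else (l, segs, dsegs)) := by
        simp [pvStepA, hP]
      have eB : pvStepB (tmp, cur, out) l =
          (if pvIsMach l then (l, PySem.Dict.empty, out ++ [(pvFlush cur l).items])
           else (l, cur, out)) := by
        simp [pvStepB, hP]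
      rw [pv_bufStep_prod _ _ hP] at hc2 hps
      by_cases hM : pvIsMach l = true
      · have hCl : pvColon l = true := hc2 hM
        have hallm := hall (by simp [hM])
        rw [eA, eB, if_pos hM, if_pos hM]
        apply ih l [] _ PySem.Dict.empty _ hps (by simp) rfl
        rw [hout, List.map_append, List.map_singleton, hcur, pv_commit segs l hallm hCl]
      · rw [Bool.not_eq_true] at hM
        rw [eA, eB, if_neg (by simp [hM]), if_neg (by simp [hM])]
        apply ih l segs dsegs cur out hps _ hcur hout
        intro hr
        exact hall (by simp [hr])
    · rw [Bool.not_eq_true] at hP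
      by_cases hE : l = ""
      · -- empty line: nothing happens
        subst hE
        have c2 : pvIsMach "" = false := by decide
        have eA : pvStepA (tmp, segs, dsegs) "" = (tmp, segs, dsegs) := by
          simp [pvStepA, hP, c2]
        have eB : pvStepB (tmp, cur, out) "" = (tmp, cur, out) := by
          simp [pvStepB, hP, c2]
        rw [pv_bufStep_other _ _ (by decide) hP] at hps
        rw [eA, eB]
        apply ih tmp segs dsegs cur out hps _ hcur hout
        intro hr
        exact hall (by simp [hr])
      · have hne : (l != "") = true := by simp [hE]
        by_cases hC : pvColon l = true
        · -- non-empty line with colon and no product marker: commit the buffer, buffer := line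
          have eA : pvStepA (tmp, segs, dsegs) l =
              (if pvIsMach l then (l, [], dsegs ++ [(segs ++ [tmp]) ++ [l]])
               else (l, segs ++ [tmp], dsegs)) := by
            simp [pvStepA, hP, hC, hne]
          have eB : pvStepB (tmp, cur, out) l =
              (if pvIsMach l then
                 (l, PySem.Dict.empty, out ++ [(pvFlush (pvFlush cur tmp) l).items])
               else (l, pvFlush cur tmp, out)) := by
            simp [pvStepB, hP, hC, hne]
          rw [pv_bufStep_colon _ _ hC, ← hC] at hps
          have hcur' : pvFlush cur tmp = (segs ++ [tmp]).foldl pvFlush PySem.Dict.empty := by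
            rw [hcur, List.foldl_append]
            rfl
          by_cases hM : pvIsMach l = true
          · have htmp : pvColon tmp = true := hc1 ⟨hP, hE, hC, by simp [hM]⟩
            have hallm := hall (by simp [hM])
            rw [eA, eB, if_pos hM, if_pos hM]
            apply ih l [] _ PySem.Dict.empty _ hps (by simp) rfl
            rw [hout, List.map_append, List.map_singleton, hcur',
              pv_commit (segs ++ [tmp]) l (by simp [List.all_append, hallm, htmp]) hC]
          · rw [Bool.not_eq_true] at hM
            rw [eA, eB, if_neg (by simp [hM]), if_neg (by simp [hM])]
            apply ih l (segs ++ [tmp]) dsegs (pvFlush cur tmp) out hps _ hcur' hout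
            intro hr
            have htmp : pvColon tmp = true := hc1 ⟨hP, hE, hC, by simp [hr]⟩
            simp [List.all_append, hall (by simp [hr]), htmp]
        · -- non-empty line without colon: continuation, buffer grows
          rw [Bool.not_eq_true] at hC
          have eA : pvStepA (tmp, segs, dsegs) l =
              (if pvIsMach l then
                 (tmp ++ " " ++ PySem.Str.strip l, [],
                   dsegs ++ [segs ++ [tmp ++ " " ++ PySem.Str.strip l]])
               else (tmp ++ " " ++ PySem.Str.strip l, segs, dsegs)) := by
            simp [pvStepA, hP, hC, hne]
          have eB : pvStepB (tmp, cur, out) l =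
              (if pvIsMach l then
                 (tmp ++ " " ++ PySem.Str.strip l, PySem.Dict.empty,
                   out ++ [(pvFlush cur (tmp ++ " " ++ PySem.Str.strip l)).items])
               else (tmp ++ " " ++ PySem.Str.strip l, cur, out)) := by
            simp [pvStepB, hP, hC, hne]
          rw [pv_bufStep_other _ _ hC hP] at hps hc2
          rw [← pv_colon_cont tmp l hC] at hps hc2
          by_cases hM : pvIsMach l = true
          · have htmp : pvColon (tmp ++ " " ++ PySem.Str.strip l) = true := hc2 hM
            have hallm := hall (by simp [hM])
            rw [eA, eB, if_pos hM, if_pos hM]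
            apply ih _ [] _ PySem.Dict.empty _ hps (by simp) rfl
            rw [hout, List.map_append, List.map_singleton, hcur, pv_commit segs _ hallm htmp]
          · rw [Bool.not_eq_true] at hM
            rw [eA, eB, if_neg (by simp [hM]), if_neg (by simp [hM])]
            apply ih _ segs dsegs cur out hps _ hcur hout
            intro hr
            exact hall (by simp [hr])

-- ===== VERDICT (by name: the statement is the Claim_ definition above) =====
theorem parse_listavailable_output_py_spec : Claim_equal_parse_listavailable_output_py := by
  intro output _ hpre
  unfold Spec_parse_listavailable_output_py
  unfold parse_listavailable_output_py parse_listavailable_output_py_alt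
  refine (pv_loop (PySem.Str.splitlines output) "" [] [] PySem.Dict.empty [] ?_ (by simp) rfl rfl).symm
  exact pv_pre_to_preS _ _ hpre
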